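-- pv_equiv track=rewrite | github.com/knobs-dials/unicode-tool | helpers_unicode.py | is_utf16_with_surrogates
-- ===== SOURCE A (Python) =====
-- def is_surrogate(cp: int):
--     if cp>=0xD800 and cp<=0xDBFF: # High Surrogate Area
--         return True
--     #if cp>=0xDB80 and cp<=0xDBFF: # High Private Use Surrogates
--     #    return True
--     if cp>=0xDC00 and cp<=0xDFFF: # Low Surrogate Area
--         return True
--     return False
--
-- def is_utf16_with_surrogates(cp_list):
--     ' if max codepoint is <=U+FFFF and there is at least one codepoint in the surrogate range '
--     if len(cp_list)>0:
--         if max(cp_list) <= 0xffff: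
--             has_surrogates = False
--             for cp in cp_list:
--                 if is_surrogate(cp):
--                     return True
--     return False
-- ===== SOURCE B (Python) =====
-- def is_utf16_with_surrogates(cp_list):
--     mx = None
--     saw = False
--     for cp in cp_list:
--         if mx is None or cp > mx:
--             mx = cp
--         if 0xD800 <= cp <= 0xDFFF:
--             saw = True
--     return mx is not None and mx <= 0xffff and saw
-- ===== Notes on version B (the rewrite author's own statement) =====
-- stated objective: alternative
-- what changed: Replaces A's two separate scans (max() then a surrogate-search loop with early return) by a single pass accumulating a running maximum and a saw-surrogate flag, with one combined surrogate range test, returning the conjunction at the end.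
import Mathlib
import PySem

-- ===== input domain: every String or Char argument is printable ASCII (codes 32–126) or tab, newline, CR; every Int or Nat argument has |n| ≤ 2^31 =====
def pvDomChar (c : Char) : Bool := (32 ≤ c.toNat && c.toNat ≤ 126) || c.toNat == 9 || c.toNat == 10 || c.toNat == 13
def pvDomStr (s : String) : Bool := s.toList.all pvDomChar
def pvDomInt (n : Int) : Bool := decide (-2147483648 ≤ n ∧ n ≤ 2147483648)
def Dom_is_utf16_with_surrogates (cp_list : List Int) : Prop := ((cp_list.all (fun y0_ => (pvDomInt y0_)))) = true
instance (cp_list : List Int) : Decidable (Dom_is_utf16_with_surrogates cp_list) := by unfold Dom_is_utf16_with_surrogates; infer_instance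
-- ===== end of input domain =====

-- B replaces A's two scans (max(), then a surrogate-search loop) by one fold keeping a running max and a surrogate flag; alternative decomposition, same cost.


-- ===== PORT A =====
def is_surrogate (cp : Int) : Bool :=
  if cp ≥ 0xD800 ∧ cp ≤ 0xDBFF then true
  else if cp ≥ 0xDC00 ∧ cp ≤ 0xDFFF then true
  else false

-- the 'for cp in cp_list: if is_surrogate(cp): return True' loop (falls through to False)
def pvALoop : List Int → Bool
  | [] => false
  | cp :: rest => if is_surrogate cp then true else pvALoop rest

def is_utf16_with_surrogates (cp_list : List Int) : Bool :=
  if cp_list.length > 0 then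
    match PySem.List.max? cp_list (fun x => x) with
    | some m => if m ≤ 0xffff then pvALoop cp_list else false
    | none => false
  else false

-- ===== PORT B =====
-- single fold: (running max as Option, saw-surrogate flag)
def pvBStep (st : Option Int × Bool) (cp : Int) : Option Int × Bool :=
  (match st.1 with
   | none => some cp
   | some m => if cp > m then some cp else some m,
   if 0xD800 ≤ cp ∧ cp ≤ 0xDFFF then true else st.2)

def is_utf16_with_surrogates_alt (cp_list : List Int) : Bool :=
  let st := cp_list.foldl pvBStep (none, false)
  match st.1 with
  | none => false
  | some m => decide (m ≤ 0xffff) && st.2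

-- ===== PRECONDITION & SPEC =====
def Spec_is_utf16_with_surrogates (cp_list : List Int) (out : Bool) : Prop := out = is_utf16_with_surrogates_alt cp_list
instance (cp_list : List Int) (out : Bool) : Decidable (Spec_is_utf16_with_surrogates cp_list out) := by unfold Spec_is_utf16_with_surrogates; infer_instance

-- ===== CLAIM (what is proved, stated in full; the proofs are below) =====
def Claim_equal_is_utf16_with_surrogates : Prop := ∀ (cp_list : List Int), Dom_is_utf16_with_surrogates cp_list → Spec_is_utf16_with_surrogates cp_list (is_utf16_with_surrogates cp_list)

-- ===== LEMMAS AND PROOFS =====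

-- B's fold state on a nonempty prefix: the max component is the running max, the flag is 'any surrogate seen'
theorem pvBfold_char (xs : List Int) (m : Int) (s : Bool) :
    xs.foldl pvBStep (some m, s) = (some (xs.foldl max m), s || xs.any (fun cp => decide (0xD800 ≤ cp ∧ cp ≤ 0xDFFF))) := by
  induction xs generalizing m s with
  | nil => simp
  | cons x t ih =>
    simp only [List.foldl_cons, List.any_cons, pvBStep]
    have hmax : (if x > m then some x else some m) = some (max m x) := by
      split_ifs with h
      · rw [max_eq_right h.le]
      · rw [max_eq_left (le_of_not_gt h)]
    rw [hmax]
    by_cases hx : 0xD800 ≤ x ∧ x ≤ 0xDFFF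
    · simp [hx, ih]
    · simp [hx, ih]

theorem pvALoop_any (xs : List Int) :
    pvALoop xs = xs.any (fun cp => decide (0xD800 ≤ cp ∧ cp ≤ 0xDFFF)) := by
  induction xs with
  | nil => rfl
  | cons x t ih =>
    simp only [pvALoop, List.any_cons, ← ih, is_surrogate]
    by_cases h1 : x ≥ 0xD800 ∧ x ≤ 0xDBFF <;> by_cases h2 : x ≥ 0xDC00 ∧ x ≤ 0xDFFF <;>
      by_cases h3 : 0xD800 ≤ x ∧ x ≤ 0xDFFF <;> simp [h1, h2, h3] <;> omega

-- ===== VERDICT (by name: the statement is the Claim_ definition above) =====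
theorem is_utf16_with_surrogates_spec : Claim_equal_is_utf16_with_surrogates := by
  intro cp_list _
  unfold Spec_is_utf16_with_surrogates is_utf16_with_surrogates is_utf16_with_surrogates_alt
  cases cp_list with
  | nil => simp
  | cons x t =>
    rw [PySem.List.max?_id_cons]
    simp only [List.length_cons, List.foldl_cons]
    have h0 : pvBStep (none, false) x = (some x, decide (0xD800 ≤ x ∧ x ≤ 0xDFFF)) := by
      simp only [pvBStep]
      split_ifs with h <;> simp [h]
    rw [h0, pvBfold_char, pvALoop_any]
    by_cases hm : t.foldl max x ≤ 0xffff <;> simp [hm, List.any_cons]
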